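-- pv_equiv track=rewrite | github.com/guolisen/cluster-storage-troubleshooting | information_collector/metadata_parsers.py | _extract_dmesg_issue
-- ===== SOURCE A (Python) =====
-- from typing import Dict, List, Any
--
-- def _extract_dmesg_issue(line: str) -> Dict[str, Any]:
--     """Extract issue information from a dmesg log line"""
--     issue = None
--     line_lower = line.lower()
--
--     # Disk/Drive hardware errors
--     if any(keyword in line_lower for keyword in ['disk error', 'drive error', 'bad sector', 'i/o error']):
--         severity = 'critical' if 'bad sector' in line_lower else 'high'
--         issue = {
--             'type': 'disk_hardware_error',
--             'severity': severity,
--             'description': f"Hardware disk error detected: {line}",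
--             'raw_log': line,
--             'source': 'dmesg'
--         }
--
--     # NVMe/SSD specific issues
--     elif any(keyword in line_lower for keyword in ['nvme', 'ssd']) and any(error in line_lower for error in ['error', 'fail', 'timeout']):
--         issue = {
--             'type': 'nvme_ssd_error',
--             'severity': 'high',
--             'description': f"NVMe/SSD error detected: {line}",
--             'raw_log': line,
--             'source': 'dmesg'
--         }
--
--     # Filesystem errors
--     elif any(keyword in line_lower for keyword in ['xfs', 'ext4']) and any(error in line_lower for error in ['error', 'corrupt', 'fail']):
--         issue = {
--             'type': 'filesystem_error',
--             'severity': 'high',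
--             'description': f"Filesystem error detected: {line}",
--             'raw_log': line,
--             'source': 'dmesg'
--         }
--
--     # I/O timeout issues
--     elif 'timeout' in line_lower and any(keyword in line_lower for keyword in ['i/o', 'io', 'disk', 'drive']):
--         issue = {
--             'type': 'io_timeout',
--             'severity': 'medium',
--             'description': f"I/O timeout detected: {line}",
--             'raw_log': line,
--             'source': 'dmesg'
--         }
--
--     # Controller/SCSI/SATA issues
--     elif any(keyword in line_lower for keyword in ['controller', 'scsi', 'sata']) and any(error in line_lower for error in ['error', 'fail', 'reset']):
--         issue = {
--             'type': 'controller_error',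
--             'severity': 'high',
--             'description': f"Storage controller error detected: {line}",
--             'raw_log': line,
--             'source': 'dmesg'
--         }
--
--     return issue
-- ===== SOURCE B (Python) =====
-- from typing import Dict, List, Any
--
-- # Every token the classifier ever looks for, in one catalogue.
-- _TOKENS = ['disk error', 'drive error', 'bad sector', 'i/o error',
--            'nvme', 'ssd', 'error', 'fail', 'timeout',
--            'xfs', 'ext4', 'corrupt',
--            'i/o', 'io', 'disk', 'drive',
--            'controller', 'scsi', 'sata', 'reset']
--
-- def _extract_dmesg_issue(line: str) -> Dict[str, Any]:
--     ll = line.lower()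
--     # One positional sweep over the lowered line builds the occurrence index:
--     # the set of catalogue tokens present in ll.  After this, classification is
--     # pure membership logic -- no substring searches in the branches.
--     found = {t for i in range(len(ll)) for t in _TOKENS if ll.startswith(t, i)}
--
--     def mk(typ, sev, prefix):
--         return {'type': typ, 'severity': sev,
--                 'description': prefix + line, 'raw_log': line, 'source': 'dmesg'}
--
--     def hit(*ts):
--         return any(t in found for t in ts)
--
--     if hit('disk error', 'drive error', 'bad sector', 'i/o error'):
--         return mk('disk_hardware_error',
--                   'critical' if 'bad sector' in found else 'high',
--                   'Hardware disk error detected: ')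
--     if hit('nvme', 'ssd') and hit('error', 'fail', 'timeout'):
--         return mk('nvme_ssd_error', 'high', 'NVMe/SSD error detected: ')
--     if hit('xfs', 'ext4') and hit('error', 'corrupt', 'fail'):
--         return mk('filesystem_error', 'high', 'Filesystem error detected: ')
--     if hit('timeout') and hit('i/o', 'io', 'disk', 'drive'):
--         return mk('io_timeout', 'medium', 'I/O timeout detected: ')
--     if hit('controller', 'scsi', 'sata') and hit('error', 'fail', 'reset'):
--         return mk('controller_error', 'high', 'Storage controller error detected: ')
--     return None
-- ===== Notes on version B (the rewrite author's own statement) =====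
-- stated objective: alternative
-- what changed: B first builds, in one positional left-to-right sweep over the lowered line (startswith at each index), the set of all catalogue tokens that occur, and then classifies by pure membership tests in that precomputed occurrence index; A instead runs a separate substring search per keyword inside each if/elif branch.
import Mathlib
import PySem

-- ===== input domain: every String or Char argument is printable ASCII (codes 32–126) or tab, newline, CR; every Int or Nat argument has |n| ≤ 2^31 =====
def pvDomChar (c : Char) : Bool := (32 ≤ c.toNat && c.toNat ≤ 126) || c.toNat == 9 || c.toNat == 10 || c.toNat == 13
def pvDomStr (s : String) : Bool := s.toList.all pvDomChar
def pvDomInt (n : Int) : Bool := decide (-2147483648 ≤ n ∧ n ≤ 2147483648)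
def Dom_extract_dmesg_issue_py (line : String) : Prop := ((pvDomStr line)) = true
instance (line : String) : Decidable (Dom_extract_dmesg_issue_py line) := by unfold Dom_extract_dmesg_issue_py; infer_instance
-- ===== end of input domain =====

-- B builds the set of occurring catalogue tokens in one positional sweep and classifies by
-- membership in that index, instead of A's per-keyword substring search in each branch
-- (objective: alternative); return values are identical on every input.

-- ===== PORT A =====
def extract_dmesg_issue_py (line : String) : Option (List (String × String)) :=
  let line_lower := PySem.Str.lower line
  if ["disk error", "drive error", "bad sector", "i/o error"].any
       (fun k => PySem.Str.isIn k line_lower) then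
    let severity := if PySem.Str.isIn "bad sector" line_lower then "critical" else "high"
    some [("type", "disk_hardware_error"), ("severity", severity),
          ("description", PySem.Str.join "" ["Hardware disk error detected: ", line]),
          ("raw_log", line), ("source", "dmesg")]
  else if (["nvme", "ssd"].any (fun k => PySem.Str.isIn k line_lower)) &&
          (["error", "fail", "timeout"].any (fun e => PySem.Str.isIn e line_lower)) then
    some [("type", "nvme_ssd_error"), ("severity", "high"),
          ("description", PySem.Str.join "" ["NVMe/SSD error detected: ", line]),
          ("raw_log", line), ("source", "dmesg")]
  else if (["xfs", "ext4"].any (fun k => PySem.Str.isIn k line_lower)) &&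
          (["error", "corrupt", "fail"].any (fun e => PySem.Str.isIn e line_lower)) then
    some [("type", "filesystem_error"), ("severity", "high"),
          ("description", PySem.Str.join "" ["Filesystem error detected: ", line]),
          ("raw_log", line), ("source", "dmesg")]
  else if (PySem.Str.isIn "timeout" line_lower) &&
          (["i/o", "io", "disk", "drive"].any (fun k => PySem.Str.isIn k line_lower)) then
    some [("type", "io_timeout"), ("severity", "medium"),
          ("description", PySem.Str.join "" ["I/O timeout detected: ", line]),
          ("raw_log", line), ("source", "dmesg")]
  else if (["controller", "scsi", "sata"].any (fun k => PySem.Str.isIn k line_lower)) &&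
          (["error", "fail", "reset"].any (fun e => PySem.Str.isIn e line_lower)) then
    some [("type", "controller_error"), ("severity", "high"),
          ("description", PySem.Str.join "" ["Storage controller error detected: ", line]),
          ("raw_log", line), ("source", "dmesg")]
  else
    none

-- ===== PORT B =====
-- the catalogue of every token the classifier looks for (Source B's _TOKENS)
def pvTokens : List (List Char) :=
  ["disk error".toList, "drive error".toList, "bad sector".toList, "i/o error".toList,
   "nvme".toList, "ssd".toList, "error".toList, "fail".toList, "timeout".toList,
   "xfs".toList, "ext4".toList, "corrupt".toList,
   "i/o".toList, "io".toList, "disk".toList, "drive".toList,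
   "controller".toList, "scsi".toList, "sata".toList, "reset".toList]

-- the set comprehension {t for i in range(len(ll)) for t in _TOKENS if ll.startswith(t, i)}
def pvFound (ll : List Char) : PySem.Set (List Char) :=
  PySem.Set.ofList
    ((PySem.List.pyRange 0 (ll.length : Int) 1).flatMap
      (fun i => pvTokens.filter (fun t => PySem.Chars.startswith (ll.drop i.toNat) t)))

-- hit(*ts) = any(t in found for t in ts)
def pvHit (found : PySem.Set (List Char)) (ts : List (List Char)) : Bool :=
  ts.any (fun t => PySem.Set.contains found t)

-- mk(typ, sev, prefix); 'prefix + line' is ported as join "" [pre, line] (exact concatenation)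
def pvMk (typ sev pre line : String) : Option (List (String × String)) :=
  some [("type", typ), ("severity", sev),
        ("description", PySem.Str.join "" [pre, line]),
        ("raw_log", line), ("source", "dmesg")]

def extract_dmesg_issue_py_alt (line : String) : Option (List (String × String)) :=
  let ll := PySem.Chars.lower line.toList
  let found := pvFound ll
  if pvHit found ["disk error".toList, "drive error".toList, "bad sector".toList, "i/o error".toList] then
    pvMk "disk_hardware_error"
      (if PySem.Set.contains found "bad sector".toList then "critical" else "high")
      "Hardware disk error detected: " line
  else if pvHit found ["nvme".toList, "ssd".toList] &&
          pvHit found ["error".toList, "fail".toList, "timeout".toList] then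
    pvMk "nvme_ssd_error" "high" "NVMe/SSD error detected: " line
  else if pvHit found ["xfs".toList, "ext4".toList] &&
          pvHit found ["error".toList, "corrupt".toList, "fail".toList] then
    pvMk "filesystem_error" "high" "Filesystem error detected: " line
  else if pvHit found ["timeout".toList] &&
          pvHit found ["i/o".toList, "io".toList, "disk".toList, "drive".toList] then
    pvMk "io_timeout" "medium" "I/O timeout detected: " line
  else if pvHit found ["controller".toList, "scsi".toList, "sata".toList] &&
          pvHit found ["error".toList, "fail".toList, "reset".toList] then
    pvMk "controller_error" "high" "Storage controller error detected: " line
  else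
    none

-- ===== PRECONDITION & SPEC =====
def Spec_extract_dmesg_issue_py (line : String) (out : Option (List (String × String))) : Prop := out = extract_dmesg_issue_py_alt line
instance (line : String) (out : Option (List (String × String))) : Decidable (Spec_extract_dmesg_issue_py line out) := by unfold Spec_extract_dmesg_issue_py; infer_instance

-- ===== CLAIM (what is proved, stated in full; the proofs are below) =====
def Claim_equal_extract_dmesg_issue_py : Prop := ∀ (line : String), Dom_extract_dmesg_issue_py line → Spec_extract_dmesg_issue_py line (extract_dmesg_issue_py line)

-- ===== LEMMAS AND PROOFS =====

-- membership in the sweep-built occurrence index is exactly Python's 'token in ll'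
theorem contains_pvFound (ll t : List Char) (ht : t ∈ pvTokens) (hne : t ≠ []) :
    PySem.Set.contains (pvFound ll) t = PySem.Chars.isIn t ll := by
  rw [Bool.eq_iff_iff, PySem.Set.contains_iff]
  unfold pvFound
  rw [PySem.Set.mem_ofList, List.mem_flatMap]
  constructor
  · rintro ⟨i, _hi, hmem⟩
    rw [List.mem_filter] at hmem
    rw [← PySem.Chars.exists_prefix_drop_iff_isIn]
    exact ⟨i.toNat, (PySem.Chars.startswith_iff _ _).mp hmem.2⟩
  · intro hin
    obtain ⟨j, hj⟩ := (PySem.Chars.exists_prefix_drop_iff_isIn t ll).mpr hin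
    have hjlt : j < ll.length := by
      by_contra hge
      have : ll.drop j = [] := List.drop_eq_nil_of_le (by omega)
      rw [this, List.prefix_nil] at hj
      exact hne hj
    refine ⟨(j : Int), ?_, ?_⟩
    · rw [PySem.List.mem_pyRange_one]
      constructor <;> [positivity; exact_mod_cast hjlt]
    · rw [List.mem_filter]
      exact ⟨ht, by rw [PySem.Chars.startswith_iff]; simpa using hj⟩

-- ===== VERDICT (by name: the statement is the Claim_ definition above) =====
theorem extract_dmesg_issue_py_spec : Claim_equal_extract_dmesg_issue_py := by
  intro line _
  unfold Spec_extract_dmesg_issue_py extract_dmesg_issue_py extract_dmesg_issue_py_alt pvHit pvMk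
  have hc : ∀ t ∈ pvTokens,
      PySem.Set.contains (pvFound (PySem.Chars.lower line.toList)) t =
        PySem.Chars.isIn t (PySem.Chars.lower line.toList) := by
    intro t ht
    exact contains_pvFound _ t ht (by revert ht; unfold pvTokens; intro ht; fin_cases ht <;> simp)
  have h0 := hc "disk error".toList (by unfold pvTokens; simp)
  have h1 := hc "drive error".toList (by unfold pvTokens; simp)
  have h2 := hc "bad sector".toList (by unfold pvTokens; simp)
  have h3 := hc "i/o error".toList (by unfold pvTokens; simp)
  have h4 := hc "nvme".toList (by unfold pvTokens; simp)
  have h5 := hc "ssd".toList (by unfold pvTokens; simp)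
  have h6 := hc "error".toList (by unfold pvTokens; simp)
  have h7 := hc "fail".toList (by unfold pvTokens; simp)
  have h8 := hc "timeout".toList (by unfold pvTokens; simp)
  have h9 := hc "xfs".toList (by unfold pvTokens; simp)
  have h10 := hc "ext4".toList (by unfold pvTokens; simp)
  have h11 := hc "corrupt".toList (by unfold pvTokens; simp)
  have h12 := hc "i/o".toList (by unfold pvTokens; simp)
  have h13 := hc "io".toList (by unfold pvTokens; simp)
  have h14 := hc "disk".toList (by unfold pvTokens; simp)
  have h15 := hc "drive".toList (by unfold pvTokens; simp)
  have h16 := hc "controller".toList (by unfold pvTokens; simp)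
  have h17 := hc "scsi".toList (by unfold pvTokens; simp)
  have h18 := hc "sata".toList (by unfold pvTokens; simp)
  have h19 := hc "reset".toList (by unfold pvTokens; simp)
  simp only [List.any_cons, List.any_nil, Bool.or_false, PySem.Str.isIn_eq, PySem.Str.toList_lower,
    h0, h1, h2, h3, h4, h5, h6, h7, h8, h9, h10, h11, h12, h13, h14, h15, h16, h17, h18, h19]
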